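-- pv_equiv track=rewrite | github.com/jcs242611/vigenere_cipher | test.py | find_key_lengths
-- ===== SOURCE A (Python) =====
-- from math import gcd
-- from functools import reduce
--
-- def find_key_lengths(distances, max_length=5):
--     def find_gcd(numbers):
--         return reduce(gcd, numbers)
--
--     possible_lengths = set()
--     if distances:
--         length_gcd = find_gcd(distances)
--         for i in range(1, length_gcd + 1):
--             if length_gcd % i == 0 and i <= max_length:
--                 possible_lengths.add(i)
--     return possible_lengths
-- ===== SOURCE B (Python) =====
-- from math import gcd, isqrt
-- from functools import reduce
--
-- def find_key_lengths(distances, max_length=5):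
--     if not distances:
--         return set()
--     g = reduce(gcd, distances)
--     if g <= 0:
--         return set()
--     small, large = [], []
--     for i in range(1, isqrt(g) + 1):
--         if g % i == 0:
--             if i <= max_length:
--                 small.append(i)
--             j = g // i
--             if j != i and j <= max_length:
--                 large.append(j)
--     return set(small + large[::-1])
-- ===== Notes on version B (the rewrite author's own statement) =====
-- stated objective: alternative
-- what changed: Replaces the 1..gcd linear divisor scan with a sqrt(gcd) factor-pair enumeration (small divisors collected ascending, cofactors collected and reversed), guarded by g > 0 for isqrt; on the timed input family (long lists, small gcd) the reduce(gcd, ...) step dominates, so no speedup was measured.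
import Mathlib
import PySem

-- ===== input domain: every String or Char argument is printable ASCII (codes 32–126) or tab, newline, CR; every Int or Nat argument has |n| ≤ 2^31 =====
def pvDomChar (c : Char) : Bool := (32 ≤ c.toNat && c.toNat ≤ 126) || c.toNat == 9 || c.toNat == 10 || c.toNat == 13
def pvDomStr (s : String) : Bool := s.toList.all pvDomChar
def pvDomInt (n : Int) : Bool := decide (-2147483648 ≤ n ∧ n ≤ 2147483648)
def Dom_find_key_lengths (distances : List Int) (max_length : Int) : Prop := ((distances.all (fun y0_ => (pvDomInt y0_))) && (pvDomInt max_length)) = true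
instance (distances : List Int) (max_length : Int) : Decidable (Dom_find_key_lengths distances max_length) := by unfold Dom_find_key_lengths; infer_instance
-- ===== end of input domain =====

-- B replaces A's 1..gcd linear divisor scan with a √gcd factor-pair enumeration (objective: alternative).

-- ===== PORT A =====
def find_key_lengths (distances : List Int) (max_length : Int) : List Int :=
  match distances with
  | [] => []                                          -- 'if distances:' false → returns the empty set
  | d :: ds =>
      -- find_gcd = reduce(gcd, numbers): fold math.gcd over the list, first element as start
      let g : Int := ds.foldl (fun a b => (Int.gcd a b : Int)) d
      (PySem.List.pyRange 1 (g+1) 1).foldl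
        (fun s i => if PySem.Int.mod g i = 0 ∧ i ≤ max_length then PySem.Set.add s i else s)
        ([] : PySem.Set Int)

-- ===== PORT B =====
def find_key_lengths_alt (distances : List Int) (max_length : Int) : List Int :=
  match distances with
  | [] => []
  | d :: ds =>
      let g : Int := ds.foldl (fun a b => (Int.gcd a b : Int)) d
      if g ≤ 0 then []
      else
        let r : Int := (g.toNat.sqrt : Int)           -- math.isqrt(g), g > 0
        let sl := (PySem.List.pyRange 1 (r+1) 1).foldl
          (fun (p : List Int × List Int) i =>
            if PySem.Int.mod g i = 0 then
              let p1 := if i ≤ max_length then (p.1 ++ [i], p.2) else p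
              let j := PySem.Int.floordiv g i
              if j ≠ i ∧ j ≤ max_length then (p1.1, p1.2 ++ [j]) else p1
            else p) (([], []) : List Int × List Int)
        PySem.Set.ofList (sl.1 ++ sl.2.reverse)       -- set(small + large[::-1])

-- ===== PRECONDITION & SPEC =====
def Spec_find_key_lengths (distances : List Int) (max_length : Int) (out : List Int) : Prop := out = find_key_lengths_alt distances max_length
instance (distances : List Int) (max_length : Int) (out : List Int) : Decidable (Spec_find_key_lengths distances max_length out) := by unfold Spec_find_key_lengths; infer_instance

-- ===== CLAIM (what is proved, stated in full; the proofs are below) =====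
def Claim_equal_find_key_lengths : Prop := ∀ (distances : List Int) (max_length : Int), Dom_find_key_lengths distances max_length → Spec_find_key_lengths distances max_length (find_key_lengths distances max_length)

-- ===== LEMMAS AND PROOFS =====

-- A's loop: folding conditional Set.add over a duplicate-free list of fresh elements appends the filtered list.
lemma foldl_set_add (p : Int → Prop) [DecidablePred p] :
    ∀ (l : List Int) (s : List Int), l.Nodup → (∀ i ∈ l, i ∉ s) →
      l.foldl (fun s i => if p i then PySem.Set.add s i else s) s
        = s ++ l.filter (fun i => decide (p i)) := by
  intro l
  induction l with
  | nil => intro s _ _; simp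
  | cons a t ih =>
    intro s hnd hf
    have ha : a ∉ s := hf a (by simp)
    have hadd : PySem.Set.add s a = s ++ [a] := by
      simp [PySem.Set.add, PySem.Set.contains, ha]
    simp only [List.foldl_cons]
    by_cases hp : p a
    · rw [if_pos hp, hadd, ih (s ++ [a]) hnd.of_cons]
      · simp [hp]
      · intro i hi
        simp only [List.mem_append, List.mem_singleton]
        rintro (h | rfl)
        · exact hf i (by simp [hi]) h
        · exact (List.nodup_cons.mp hnd).1 hi
    · rw [if_neg hp, ih s hnd.of_cons (fun i hi => hf i (by simp [hi]))]
      simp [hp]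

-- B's loop: the pair-accumulating fold is (filter, filterMap) of the index list.
lemma foldl_pair (g m : Int) :
    ∀ (l : List Int) (x y : List Int),
      l.foldl
        (fun (p : List Int × List Int) i =>
          if PySem.Int.mod g i = 0 then
            let p1 := if i ≤ m then (p.1 ++ [i], p.2) else p
            let j := PySem.Int.floordiv g i
            if j ≠ i ∧ j ≤ m then (p1.1, p1.2 ++ [j]) else p1
          else p) (x, y)
      = (x ++ l.filter (fun i => decide (PySem.Int.mod g i = 0 ∧ i ≤ m)),
         y ++ l.filterMap (fun i =>
           if PySem.Int.mod g i = 0 ∧ (PySem.Int.floordiv g i ≠ i ∧ PySem.Int.floordiv g i ≤ m)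
           then some (PySem.Int.floordiv g i) else none)) := by
  intro l
  induction l with
  | nil => intro x y; simp
  | cons a t ih =>
    intro x y
    simp only [List.foldl_cons, List.filter_cons, List.filterMap_cons]
    by_cases h1 : PySem.Int.mod g a = 0 <;>
      by_cases h2 : a ≤ m <;>
        by_cases h3 : PySem.Int.floordiv g a ≠ a ∧ PySem.Int.floordiv g a ≤ m <;>
          simp [h1, h2, h3, ih]

-- range(1, n+1) as the cast of a Nat interval.
lemma pyRange_one_cast (n : Nat) :
    PySem.List.pyRange 1 ((n:Int)+1) 1 = (List.range' 1 n).map (Nat.cast : Nat → Int) := by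
  apply List.ext_getElem
  · simp [PySem.List.length_pyRange_one]
  · intro k h1 h2
    rw [PySem.List.getElem_pyRange_one]
    simp [List.getElem_range']

-- the divisor-pairing core, over Nat: divisors of n in (√n, n] (with the ≤ m filter applied)
-- are exactly the reversed cofactors n/k of the filtered divisors k ≤ √n.
lemma pairing (n : Nat) (m : Int) (hn : 0 < n) :
    (List.range' (n.sqrt+1) (n - n.sqrt)).filter (fun k => decide (n % k = 0 ∧ (k:Int) ≤ m))
      = ((List.range' 1 n.sqrt).filterMap (fun k =>
          if n % k = 0 ∧ (n/k ≠ k ∧ ((n/k : Nat):Int) ≤ m) then some (n/k) else none)).reverse := by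
  set r := n.sqrt with hr
  set fn : Nat → Option Nat := (fun k =>
      if n % k = 0 ∧ (n/k ≠ k ∧ ((n/k : Nat):Int) ≤ m) then some (n/k) else none) with hfn
  have hrr : r * r ≤ n := Nat.sqrt_le n
  have hlt : n < (r+1) * (r+1) := Nat.lt_succ_sqrt n
  have hrn : r ≤ n := Nat.sqrt_le_self n
  -- sortedness of the left side
  have hpL : ((List.range' (r+1) (n - r)).filter
      (fun k => decide (n % k = 0 ∧ (k:Int) ≤ m))).Pairwise (· < ·) :=
    (List.pairwise_lt_range' 1).filter _
  -- sortedness (descending) of the un-reversed right side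
  have hpR : ((List.range' 1 r).filterMap fn).Pairwise (fun a b => b < a) := by
    rw [List.pairwise_filterMap]
    have base : (List.range' 1 r).Pairwise (fun a b => 1 ≤ a ∧ a < b) := by
      have h1 : (List.range' 1 r).Pairwise (· < ·) := List.pairwise_lt_range' 1
      have h2 : ∀ x ∈ List.range' 1 r, 1 ≤ x := by
        intro x hx; exact (List.mem_range'_1.mp hx).1
      refine (List.Pairwise.and_mem.mp h1).imp ?_
      rintro a b ⟨ha, _, hab⟩
      exact ⟨h2 a ha, hab⟩
    refine base.imp ?_
    rintro k1 k2 ⟨hk1, hklt⟩ b hb b' hb'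
    rw [hfn] at hb hb'
    simp only at hb hb'
    split at hb
    case isFalse => exact absurd hb (by simp)
    split at hb'
    case isFalse => exact absurd hb' (by simp)
    rename_i c1 c2
    obtain ⟨hd1, -, -⟩ := c1
    obtain ⟨hd2, -, -⟩ := c2
    have hb := Option.some.inj hb
    have hb' := Option.some.inj hb'
    subst hb hb'
    have hdv1 : k1 ∣ n := Nat.dvd_of_mod_eq_zero hd1
    have hdv2 : k2 ∣ n := Nat.dvd_of_mod_eq_zero hd2
    have hle : n / k2 ≤ n / k1 := Nat.div_le_div_left (le_of_lt hklt) (by omega)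
    rcases lt_or_eq_of_le hle with h | h
    · exact h
    · exfalso
      have e1 : n / (n / k1) = k1 := Nat.div_div_self hdv1 (by omega)
      have e2 : n / (n / k2) = k2 := Nat.div_div_self hdv2 (by omega)
      rw [← e1, ← e2, h] at hklt
      exact lt_irrefl _ hklt
  -- membership equivalence: j is a large filtered divisor iff j = n/k for a small one
  have hmem : ∀ j, j ∈ (List.range' (r+1) (n - r)).filter
      (fun k => decide (n % k = 0 ∧ (k:Int) ≤ m)) ↔ j ∈ (List.range' 1 r).filterMap fn := by
    intro j
    rw [List.mem_filter, List.mem_filterMap, List.mem_range'_1]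
    simp only [decide_eq_true_eq]
    constructor
    · rintro ⟨⟨hj1, hj2⟩, hjd, hjm⟩
      have hjn : j ≤ n := by omega
      have hjpos : 0 < j := by omega
      have hdvj : j ∣ n := Nat.dvd_of_mod_eq_zero hjd
      have e : n / (n / j) = j := Nat.div_div_self hdvj (by omega)
      have h1 : 1 ≤ n / j := (Nat.one_le_div_iff hjpos).mpr hjn
      have h2 : n / j ≤ n / (r+1) := Nat.div_le_div_left hj1 (by omega)
      have h3 : n / (r+1) < r + 1 := Nat.div_lt_of_lt_mul hlt
      refine ⟨n / j, ?_, ?_⟩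
      · rw [List.mem_range'_1]
        omega
      · rw [hfn]
        simp only
        have hc : n % (n / j) = 0 := Nat.mod_eq_zero_of_dvd (Nat.div_dvd_of_dvd hdvj)
        rw [if_pos ⟨hc, by rw [e]; omega, by rw [e]; exact hjm⟩, e]
    · rintro ⟨k, hk, hkeq⟩
      rw [List.mem_range'_1] at hk
      rw [hfn] at hkeq
      simp only at hkeq
      split at hkeq
      case isFalse => exact absurd hkeq (by simp)
      rename_i c
      obtain ⟨hd, hne, hm'⟩ := c
      have hkeq := Option.some.inj hkeq
      subst hkeq
      have hdv : k ∣ n := Nat.dvd_of_mod_eq_zero hd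
      have hkpos : 0 < k := by omega
      have hjpos : 0 < n / k := Nat.div_pos (Nat.le_of_dvd hn hdv) hkpos
      have hjn : n / k ≤ n := Nat.div_le_self n k
      have hjd : n % (n / k) = 0 := Nat.mod_eq_zero_of_dvd (Nat.div_dvd_of_dvd hdv)
      have hjgt : r + 1 ≤ n / k := by
        by_contra hcon
        have hjr : n / k ≤ r := by omega
        have hkr : k ≤ r := by omega
        have hmul : k * (n / k) = n := Nat.mul_div_cancel' hdv
        have hle1 : k * (n / k) ≤ r * r := Nat.mul_le_mul hkr hjr
        have hnrr : n = r * r := le_antisymm (hmul ▸ hle1) hrr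
        have hkr' : k = r := by
          rcases Nat.lt_or_ge k r with hlt' | hge
          · exfalso
            have ha : k * (n / k) ≤ k * r := Nat.mul_le_mul_left k hjr
            have hb : k * r < r * r := Nat.mul_lt_mul_of_lt_of_le hlt' (le_refl r) (by omega)
            omega
          · omega
        have h5 : r * (n / k) = r * r := by rw [← hkr', hmul, hkr']; exact hnrr
        have : n / k = r := Nat.eq_of_mul_eq_mul_left (by omega) h5
        exact hne (by omega)
      exact ⟨⟨hjgt, by omega⟩, hjd, hm'⟩
  -- assemble: same elements, both strictly sorted, hence equal
  have hndL := hpL.nodup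
  have hndR : ((List.range' 1 r).filterMap fn).Nodup := hpR.nodup
  have hperm : (List.range' (r+1) (n - r)).filter
      (fun k => decide (n % k = 0 ∧ (k:Int) ≤ m)) |>.Perm
        (((List.range' 1 r).filterMap fn).reverse) := by
    rw [List.perm_ext_iff_of_nodup hndL (by simpa using hndR)]
    intro a
    rw [List.mem_reverse]
    exact hmem a
  refine hperm.eq_of_pairwise ?_ hpL ?_
  · intro a b _ _ h1 h2; omega
  · rw [List.pairwise_reverse]
    exact hpR.imp (fun h => h)

-- the two loop results agree for every g (g ≤ 0: both loops are empty).
lemma loops_eq (g m : Int) :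
    (PySem.List.pyRange 1 (g+1) 1).foldl
        (fun s i => if PySem.Int.mod g i = 0 ∧ i ≤ m then PySem.Set.add s i else s)
        ([] : PySem.Set Int)
      = (if g ≤ 0 then [] else
          let r : Int := (g.toNat.sqrt : Int)
          let sl := (PySem.List.pyRange 1 (r+1) 1).foldl
            (fun (p : List Int × List Int) i =>
              if PySem.Int.mod g i = 0 then
                let p1 := if i ≤ m then (p.1 ++ [i], p.2) else p
                let j := PySem.Int.floordiv g i
                if j ≠ i ∧ j ≤ m then (p1.1, p1.2 ++ [j]) else p1
              else p) (([], []) : List Int × List Int)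
          PySem.Set.ofList (sl.1 ++ sl.2.reverse)) := by
  by_cases hg : g ≤ 0
  · rw [if_pos hg]
    have he : PySem.List.pyRange 1 (g+1) 1 = [] := by
      rw [PySem.List.pyRange_one]
      have h0 : (g + 1 - 1).toNat = 0 := by omega
      rw [h0]
      simp
    rw [he]
    rfl
  · rw [if_neg hg]
    have hg' : 0 ≤ g := by omega
    lift g to Nat using hg' with n hn'
    have hn : 0 < n := by exact_mod_cast not_le.mp hg
    have htn : ((n:Int)).toNat = n := Int.toNat_natCast n
    rw [htn]
    -- left side: fold → filter over the cast of range' 1 n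
    have hnodupL : ((List.range' 1 n).map (Nat.cast : Nat → Int)).Nodup :=
      (List.nodup_range').map (fun a b h => by exact_mod_cast h)
    rw [pyRange_one_cast n,
        foldl_set_add (fun i => PySem.Int.mod (n:Int) i = 0 ∧ i ≤ m) _ [] hnodupL (by simp)]
    -- right side: fold → (filter, filterMap) over the cast of range' 1 √n
    rw [pyRange_one_cast n.sqrt, foldl_pair]
    simp only [List.nil_append]
    -- transport the filter and the filterMap across the cast
    have hfilt : ∀ (l : List Nat),
        (l.map (Nat.cast : Nat → Int)).filter (fun i => decide (PySem.Int.mod (n:Int) i = 0 ∧ i ≤ m))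
          = (l.filter (fun k => decide (n % k = 0 ∧ (k:Int) ≤ m))).map (Nat.cast : Nat → Int) := by
      intro l
      rw [List.filter_map]
      congr 1
      apply List.filter_congr
      intro k _
      simp [PySem.Int.mod_natCast, Function.comp, Int.natCast_dvd_natCast,
            Nat.dvd_iff_mod_eq_zero]
    have hfm : ((List.range' 1 n.sqrt).map (Nat.cast : Nat → Int)).filterMap
          (fun i => if PySem.Int.mod (n:Int) i = 0 ∧ (PySem.Int.floordiv (n:Int) i ≠ i ∧ PySem.Int.floordiv (n:Int) i ≤ m)
                    then some (PySem.Int.floordiv (n:Int) i) else none)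
        = ((List.range' 1 n.sqrt).filterMap (fun k =>
            if n % k = 0 ∧ (n/k ≠ k ∧ ((n/k : Nat):Int) ≤ m) then some (n/k) else none)).map (Nat.cast : Nat → Int) := by
      rw [List.filterMap_map, List.map_filterMap]
      apply List.filterMap_congr
      intro k _
      simp only [Function.comp, PySem.Int.mod_natCast, PySem.Int.floordiv_natCast]
      by_cases h : n % k = 0 ∧ (n/k ≠ k ∧ ((n/k : Nat):Int) ≤ m)
      · rw [if_pos ⟨by exact_mod_cast h.1, by exact_mod_cast h.2.1, h.2.2⟩, if_pos h]
        rfl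
      · rw [if_neg (fun hc => h ⟨by exact_mod_cast hc.1, by exact_mod_cast hc.2.1, hc.2.2⟩), if_neg h]
        rfl
    rw [hfilt (List.range' 1 n), hfilt (List.range' 1 n.sqrt), hfm,
        ← List.map_reverse, ← List.map_append]
    -- the combinatorial core: small divisors ++ reversed cofactors = all divisors in order
    have hsplit : List.range' 1 n.sqrt ++ List.range' (n.sqrt+1) (n - n.sqrt) = List.range' 1 n := by
      have h : List.range' 1 n.sqrt ++ List.range' (1 + 1 * n.sqrt) (n - n.sqrt) 1
          = List.range' 1 (n.sqrt + (n - n.sqrt)) := List.range'_append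
      rw [show 1 + 1 * n.sqrt = n.sqrt + 1 by omega] at h
      rw [h]
      congr 1
      have := Nat.sqrt_le_self n
      omega
    have hkey : (List.range' 1 n.sqrt).filter (fun k => decide (n % k = 0 ∧ (k:Int) ≤ m))
          ++ ((List.range' 1 n.sqrt).filterMap (fun k =>
              if n % k = 0 ∧ (n/k ≠ k ∧ ((n/k : Nat):Int) ≤ m) then some (n/k) else none)).reverse
        = (List.range' 1 n).filter (fun k => decide (n % k = 0 ∧ (k:Int) ≤ m)) := by
      rw [← pairing n m hn, ← List.filter_append, hsplit]
    rw [hkey, PySem.Set.ofList_eq_self_of_nodup]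
    exact ((List.nodup_range').filter _).map (fun a b h => by exact_mod_cast h)

-- ===== VERDICT (by name: the statement is the Claim_ definition above) =====
theorem find_key_lengths_spec : Claim_equal_find_key_lengths := by
  intro ds m _
  unfold Spec_find_key_lengths find_key_lengths find_key_lengths_alt
  cases ds with
  | nil => rfl
  | cons d t => exact loops_eq (t.foldl (fun a b => (Int.gcd a b : Int)) d) m
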